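-- pv_equiv track=rewrite | github.com/tianzesun/CodeProvenance | src/engines/plagiarism_engine.py | _winnow
-- ===== SOURCE A (Python) =====
-- from typing import Dict, Set, Tuple, List, Any
--
-- def _winnow(hashes: List[int], window_size: int) -> Set[int]:
--     """Winnowing algorithm to select representative fingerprints."""
--     if len(hashes) < window_size:
--         return set(hashes)
--
--     fingerprints = set()
--     min_idx = -1
--
--     for i in range(len(hashes) - window_size + 1):
--         if min_idx < i:
--             window = hashes[i:i + window_size]
--             min_val = min(window)
--             min_idx = i + window.index(min_val)
--         else:
--             new_val = hashes[i + window_size - 1]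
--             if new_val <= hashes[min_idx]:
--                 min_val = new_val
--                 min_idx = i + window_size - 1
--             else:
--                 min_val = hashes[min_idx]
--
--         fingerprints.add(min_val)
--
--     return fingerprints
-- ===== SOURCE B (Python) =====
-- from typing import List, Set
--
-- def _winnow(hashes: List[int], window_size: int) -> Set[int]:
--     """Winnowing: the set of minima of all sliding windows."""
--     if len(hashes) < window_size:
--         return set(hashes)
--     return {min(hashes[i:i + window_size])
--             for i in range(len(hashes) - window_size + 1)}
-- ===== Notes on version B (the rewrite author's own statement) =====
-- stated objective: simpler
-- what changed: B replaces A's stateful loop that caches the index of the current window minimum (recompute-or-compare branches over min_idx) by a stateless one-line set comprehension taking min of each window slice directly.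
import Mathlib
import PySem

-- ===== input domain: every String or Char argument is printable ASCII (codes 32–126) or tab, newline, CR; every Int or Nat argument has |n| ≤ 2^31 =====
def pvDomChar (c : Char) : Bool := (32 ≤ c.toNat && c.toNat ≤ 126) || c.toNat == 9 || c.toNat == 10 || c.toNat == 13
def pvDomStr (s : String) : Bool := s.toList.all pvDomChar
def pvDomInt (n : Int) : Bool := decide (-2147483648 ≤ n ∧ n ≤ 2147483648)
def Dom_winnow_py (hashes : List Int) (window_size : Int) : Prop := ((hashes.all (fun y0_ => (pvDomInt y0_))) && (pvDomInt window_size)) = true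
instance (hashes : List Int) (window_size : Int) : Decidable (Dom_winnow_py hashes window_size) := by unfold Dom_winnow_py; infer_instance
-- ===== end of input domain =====

-- B replaces A's stateful cached-min-index loop by a stateless per-window min (simpler, not faster).

-- ===== PORT A =====
-- one loop iteration of A: state is (fingerprints, min_idx)
def winnowStepA (hashes : List Int) (window_size : Int)
    (st : PySem.Set Int × Int) (i : Int) : PySem.Set Int × Int :=
  let fingerprints := st.1
  let min_idx := st.2
  if min_idx < i then
    let window := PySem.List.slice hashes (some i) (some (i + window_size))
    match PySem.List.min? window (fun y => y) with
    | none => st  -- Python raises ValueError (empty window); unreachable under Pre_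
    | some min_val =>
      match PySem.List.index? window min_val with
      | none => st  -- unreachable: min_val ∈ window
      | some k => (PySem.Set.add fingerprints min_val, i + (k : Int))
  else
    match PySem.List.pyGet? hashes (i + window_size - 1), PySem.List.pyGet? hashes min_idx with
    | some new_val, some old_val =>
      if new_val ≤ old_val then (PySem.Set.add fingerprints new_val, i + window_size - 1)
      else (PySem.Set.add fingerprints old_val, min_idx)
    | _, _ => st  -- Python IndexError; unreachable under Pre_

def winnow_py (hashes : List Int) (window_size : Int) : List Int :=
  if (hashes.length : Int) < window_size then PySem.Set.ofList hashes
  else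
    ((PySem.List.pyRange 0 ((hashes.length : Int) - window_size + 1) 1).foldl
      (winnowStepA hashes window_size) (([] : PySem.Set Int), -1)).1

-- ===== PORT B =====
-- one element of B's set comprehension: add min(hashes[i:i+window_size])
def winnowStepB (hashes : List Int) (window_size : Int)
    (fps : PySem.Set Int) (i : Int) : PySem.Set Int :=
  match PySem.List.min? (PySem.List.slice hashes (some i) (some (i + window_size))) (fun y => y) with
  | none => fps  -- Python raises ValueError (empty window); unreachable under Pre_
  | some m => PySem.Set.add fps m

def winnow_py_alt (hashes : List Int) (window_size : Int) : List Int :=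
  if (hashes.length : Int) < window_size then PySem.Set.ofList hashes
  else
    (PySem.List.pyRange 0 ((hashes.length : Int) - window_size + 1) 1).foldl
      (winnowStepB hashes window_size) ([] : PySem.Set Int)

-- ===== PRECONDITION & SPEC =====
-- Pre_ excludes only window_size ≤ 0, where A (and B) raise ValueError on min of an empty window.
def Pre_winnow_py (hashes : List Int) (window_size : Int) : Prop := 1 ≤ window_size
instance (hashes : List Int) (window_size : Int) : Decidable (Pre_winnow_py hashes window_size) := by unfold Pre_winnow_py; infer_instance
def pvWitness_winnow_py : List Int × Int := ([3, 1, 2, 4], 2)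

def Spec_winnow_py (hashes : List Int) (window_size : Int) (out : List Int) : Prop := out = winnow_py_alt hashes window_size
instance (hashes : List Int) (window_size : Int) (out : List Int) : Decidable (Spec_winnow_py hashes window_size out) := by unfold Spec_winnow_py; infer_instance

-- ===== CLAIM (what is proved, stated in full; the proofs are below) =====
def Claim_equal_winnow_py : Prop := ∀ (hashes : List Int) (window_size : Int), Dom_winnow_py hashes window_size → Pre_winnow_py hashes window_size → Spec_winnow_py hashes window_size (winnow_py hashes window_size)

-- ===== LEMMAS AND PROOFS =====

-- the minimum of the window starting at j (0 default is never used when the window is nonempty)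
def wMin (hashes : List Int) (wn j : Nat) : Int :=
  (PySem.List.min? (List.take wn (List.drop j hashes)) (fun y => y)).getD 0

lemma min?_eq_some_of (l : List Int) (x : Int) (hx : x ∈ l) (hle : ∀ y ∈ l, x ≤ y) :
    PySem.List.min? l (fun y => y) = some x := by
  cases h : PySem.List.min? l (fun y => y) with
  | none => rw [PySem.List.min?_eq_none_iff] at h; subst h; cases hx
  | some m =>
    have hm := PySem.List.min?_mem h
    have h1 := PySem.List.min?_isMin h x hx
    have h2 := hle m hm
    simp only [le_antisymm h1 h2]

lemma min?_append_singleton (l : List Int) (x : Int) (h : l ≠ []) :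
    PySem.List.min? (l ++ [x]) (fun y => y)
      = some (min ((PySem.List.min? l (fun y => y)).getD 0) x) := by
  obtain ⟨a, t, rfl⟩ := List.exists_cons_of_ne_nil h
  rw [List.cons_append, PySem.List.min?_id_cons, PySem.List.min?_id_cons]
  simp [List.foldl_append]

lemma win_length (hashes : List Int) (wn j : Nat) (hjw : j + wn ≤ hashes.length) :
    (List.take wn (List.drop j hashes)).length = wn := by
  simp; omega

lemma win_ne_nil (hashes : List Int) (wn j : Nat) (hw : 1 ≤ wn) (hjw : j + wn ≤ hashes.length) :
    List.take wn (List.drop j hashes) ≠ [] := by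
  have := win_length hashes wn j hjw
  intro h; rw [h] at this; simp at this; omega

lemma min?_win (hashes : List Int) (wn j : Nat) (hw : 1 ≤ wn) (hjw : j + wn ≤ hashes.length) :
    PySem.List.min? (List.take wn (List.drop j hashes)) (fun y => y) = some (wMin hashes wn j) := by
  cases h : PySem.List.min? (List.take wn (List.drop j hashes)) (fun y => y) with
  | none => exact absurd ((PySem.List.min?_eq_none_iff _ _).1 h) (win_ne_nil hashes wn j hw hjw)
  | some m => simp [wMin, h]

lemma win_getElem (hashes : List Int) (wn j i : Nat) (hjw : j + wn ≤ hashes.length)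
    (hi : i < wn) :
    (List.take wn (List.drop j hashes))[i]'(by rw [win_length hashes wn j hjw]; exact hi)
      = hashes[j + i]'(by omega) := by
  simp [List.getElem_take, List.getElem_drop]

lemma win_mem_iff (hashes : List Int) (wn j : Nat) (hjw : j + wn ≤ hashes.length) (y : Int) :
    y ∈ List.take wn (List.drop j hashes) ↔ ∃ i : Nat, ∃ h : i < wn, y = hashes[j + i]'(by omega) := by
  rw [List.mem_iff_getElem]
  constructor
  · rintro ⟨i, hi, rfl⟩
    have hi' : i < wn := by have := win_length hashes wn j hjw; omega
    exact ⟨i, hi', win_getElem hashes wn j i hjw hi'⟩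
  · rintro ⟨i, hi, rfl⟩
    exact ⟨i, by rw [win_length hashes wn j hjw]; exact hi,
      win_getElem hashes wn j i hjw hi⟩

lemma wMin_le (hashes : List Int) (wn j : Nat) (hw : 1 ≤ wn) (hjw : j + wn ≤ hashes.length)
    (y : Int) (hy : y ∈ List.take wn (List.drop j hashes)) : wMin hashes wn j ≤ y :=
  PySem.List.min?_isMin (min?_win hashes wn j hw hjw) y hy

lemma win_decomp (hashes : List Int) (m j : Nat) (hjw : j + (m + 1) ≤ hashes.length) :
    List.take (m + 1) (List.drop j hashes)
      = List.take m (List.drop j hashes) ++ [hashes[j + m]'(by omega)] := by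
  rw [List.take_add_one]
  congr 1
  have h : (List.drop j hashes)[m]? = some (hashes[j + m]'(by omega)) := by
    rw [List.getElem?_eq_getElem (by simp; omega)]
    simp [List.getElem_drop]
  rw [h]; rfl

-- step of A when min_idx < i : recompute the window minimum
lemma stepA_lt (hashes : List Int) (wn j : Nat) (S : PySem.Set Int) (m : Int)
    (hw : 1 ≤ wn) (hjw : j + wn ≤ hashes.length) (hm : m < (j : Int)) :
    ∃ mn : Nat, winnowStepA hashes (wn : Int) (S, m) (j : Int)
        = (PySem.Set.add S (wMin hashes wn j), (mn : Int))
      ∧ j ≤ mn ∧ mn < j + wn ∧ hashes.getD mn 0 = wMin hashes wn j := by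
  have hslice : PySem.List.slice hashes (some (j : Int)) (some ((j : Int) + (wn : Int)))
      = List.take wn (List.drop j hashes) := PySem.List.slice_natCast_add hashes j wn
  have hmin := min?_win hashes wn j hw hjw
  have hmem : wMin hashes wn j ∈ List.take wn (List.drop j hashes) := PySem.List.min?_mem hmin
  have hidx : (PySem.List.index? (List.take wn (List.drop j hashes)) (wMin hashes wn j)).isSome := by
    rw [PySem.List.index?_isSome_iff]; exact hmem
  obtain ⟨k, hk⟩ := Option.isSome_iff_exists.1 hidx
  obtain ⟨hklt, hkv, -⟩ := PySem.List.getElem_of_index?_eq_some hk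
  have hkwn : k < wn := by rw [win_length hashes wn j hjw] at hklt; exact hklt
  refine ⟨j + k, ?_, by omega, by omega, ?_⟩
  · show winnowStepA _ _ _ _ = _
    unfold winnowStepA
    simp only [if_pos hm, hslice, hmin, hk]
    push_cast
    ring_nf
  · rw [List.getD_eq_getElem?_getD, List.getElem?_eq_getElem (by omega)]
    simp only [Option.getD_some]
    rw [← win_getElem hashes wn j k hjw hkwn, hkv]

-- step of A when min_idx ≥ i : compare the entering element with the cached minimum
lemma stepA_ge (hashes : List Int) (wn j' mn : Nat) (S : PySem.Set Int)
    (hw : 1 ≤ wn) (hjw : (j' + 1) + wn ≤ hashes.length)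
    (h1 : j' + 1 ≤ mn) (h2 : mn < j' + wn)
    (hval : hashes.getD mn 0 = wMin hashes wn j') :
    ∃ mn' : Nat, winnowStepA hashes (wn : Int) (S, (mn : Int)) ((j' + 1 : Nat) : Int)
        = (PySem.Set.add S (wMin hashes wn (j' + 1)), (mn' : Int))
      ∧ j' + 1 ≤ mn' ∧ mn' < (j' + 1) + wn ∧ hashes.getD mn' 0 = wMin hashes wn (j' + 1) := by
  obtain ⟨m1, rfl⟩ : ∃ m, wn = m + 1 := ⟨wn - 1, by omega⟩
  have hm1 : 1 ≤ m1 := by omega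
  have hmlen : mn < hashes.length := by omega
  have hnewlen : j' + (m1 + 1) < hashes.length := by omega
  set new := hashes[j' + (m1 + 1)]'(by omega) with hnew
  set old := hashes[mn]'hmlen with hold
  have holdval : old = wMin hashes (m1 + 1) j' := by
    rw [hold, ← hval, List.getD_eq_getElem?_getD, List.getElem?_eq_getElem hmlen]; rfl
  -- old is the minimum of the shrunk window starting at j'+1 of length m1
  have hC1 : PySem.List.min? (List.take m1 (List.drop (j' + 1) hashes)) (fun y => y) = some old := by
    apply min?_eq_some_of
    · rw [win_mem_iff hashes m1 (j' + 1) (by omega)]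
      refine ⟨mn - (j' + 1), by omega, ?_⟩
      have h : j' + 1 + (mn - (j' + 1)) = mn := by omega
      simp only [h]; exact hold
    · intro y hy
      rw [win_mem_iff hashes m1 (j' + 1) (by omega)] at hy
      obtain ⟨i, hi, rfl⟩ := hy
      rw [holdval]
      apply wMin_le hashes (m1 + 1) j' hw (by omega)
      rw [win_mem_iff hashes (m1 + 1) j' (by omega)]
      refine ⟨1 + i, by omega, ?_⟩
      have h : j' + (1 + i) = j' + 1 + i := by omega
      simp only [h]
  -- the minimum of the window at j'+1 is min old new
  have hdec : List.take (m1 + 1) (List.drop (j' + 1) hashes)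
      = List.take m1 (List.drop (j' + 1) hashes) ++ [hashes[(j' + 1) + m1]'(by omega)] :=
    win_decomp hashes m1 (j' + 1) (by omega)
  have hMnew : PySem.List.min? (List.take (m1 + 1) (List.drop (j' + 1) hashes)) (fun y => y)
      = some (min old new) := by
    rw [hdec, min?_append_singleton _ _ (win_ne_nil hashes m1 (j' + 1) hm1 (by omega)),
      hC1]
    simp only [Option.getD_some]
    congr 1
    have h : j' + 1 + m1 = j' + (m1 + 1) := by omega
    simp only [h]
    rfl
  have hwm : wMin hashes (m1 + 1) (j' + 1) = min old new := by
    rw [wMin, hMnew]; rfl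
  -- evaluate the step
  have hcond : ¬ ((mn : Int) < ((j' + 1 : Nat) : Int)) := by push_cast; omega
  have hg1 : PySem.List.pyGet? hashes (((j' + 1 : Nat) : Int) + ((m1 + 1 : Nat) : Int) - 1)
      = some new := by
    have h : (((j' + 1 : Nat) : Int) + ((m1 + 1 : Nat) : Int) - 1)
        = ((j' + (m1 + 1) : Nat) : Int) := by push_cast; omega
    rw [h, PySem.List.pyGet?_natCast, List.getElem?_eq_getElem (by omega)]
  have hg2 : PySem.List.pyGet? hashes (mn : Int) = some old := by
    rw [PySem.List.pyGet?_natCast, List.getElem?_eq_getElem hmlen]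
  by_cases hle : new ≤ old
  · refine ⟨j' + (m1 + 1), ?_, by omega, by omega, ?_⟩
    · unfold winnowStepA
      simp only [if_neg hcond, hg1, hg2, if_pos hle]
      simp only [Prod.mk.injEq]
      refine ⟨?_, ?_⟩
      · rw [hwm, min_eq_right hle]
      · push_cast; omega
    · rw [List.getD_eq_getElem?_getD, List.getElem?_eq_getElem (by omega)]
      simp only [Option.getD_some]
      rw [hwm, min_eq_right hle]
  · refine ⟨mn, ?_, by omega, by omega, ?_⟩
    · unfold winnowStepA
      simp only [if_neg hcond, hg1, hg2, if_neg hle]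
      rw [hwm, min_eq_left (not_le.mp hle).le]
    · rw [List.getD_eq_getElem?_getD, List.getElem?_eq_getElem hmlen]
      simp only [Option.getD_some]
      rw [hwm, min_eq_left (not_le.mp hle).le]

lemma stepB_eq (hashes : List Int) (wn j : Nat) (S : PySem.Set Int)
    (hw : 1 ≤ wn) (hjw : j + wn ≤ hashes.length) :
    winnowStepB hashes (wn : Int) S (j : Int) = PySem.Set.add S (wMin hashes wn j) := by
  unfold winnowStepB
  rw [PySem.List.slice_natCast_add, min?_win hashes wn j hw hjw]

-- loop invariant: after the first j iterations the two fingerprint sets agree and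
-- A's min_idx points at the minimum of the previous window
lemma winnow_loop (hashes : List Int) (wn : Nat) (hw : 1 ≤ wn) (hn : wn ≤ hashes.length) :
    ∀ j : Nat, j ≤ hashes.length - wn + 1 →
      ((PySem.List.pyRange 0 (j : Int) 1).foldl (winnowStepA hashes (wn : Int))
          (([] : PySem.Set Int), -1)).1
        = (PySem.List.pyRange 0 (j : Int) 1).foldl (winnowStepB hashes (wn : Int))
          ([] : PySem.Set Int)
      ∧ ( (j = 0 ∧ ((PySem.List.pyRange 0 (j : Int) 1).foldl (winnowStepA hashes (wn : Int))
              (([] : PySem.Set Int), -1)).2 = -1)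
        ∨ (∃ j' mn : Nat, j = j' + 1
            ∧ ((PySem.List.pyRange 0 (j : Int) 1).foldl (winnowStepA hashes (wn : Int))
                (([] : PySem.Set Int), -1)).2 = (mn : Int)
            ∧ j' ≤ mn ∧ mn < j' + wn ∧ hashes.getD mn 0 = wMin hashes wn j') ) := by
  intro j
  induction j with
  | zero =>
    intro _
    rw [PySem.List.pyRange_one_eq_nil (by norm_num)]
    exact ⟨rfl, Or.inl ⟨rfl, rfl⟩⟩
  | succ j ih =>
    intro hj
    have hjw : j + wn ≤ hashes.length := by omega
    obtain ⟨ihS, ihI⟩ := ih (by omega)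
    have hrange : PySem.List.pyRange 0 ((j + 1 : Nat) : Int) 1
        = PySem.List.pyRange 0 (j : Int) 1 ++ [(j : Int)] := by
      have : ((j + 1 : Nat) : Int) = (j : Int) + 1 := by push_cast; ring
      rw [this, PySem.List.pyRange_one_succ_right (by omega)]
    rw [hrange, List.foldl_append, List.foldl_append]
    set stA := (PySem.List.pyRange 0 (j : Int) 1).foldl (winnowStepA hashes (wn : Int))
      (([] : PySem.Set Int), -1) with hstA
    set sB := (PySem.List.pyRange 0 (j : Int) 1).foldl (winnowStepB hashes (wn : Int))
      ([] : PySem.Set Int) with hsB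
    simp only [List.foldl_cons, List.foldl_nil]
    have hBstep := stepB_eq hashes wn j sB hw hjw
    -- the A step, by cases on the invariant
    have hA : ∃ mn' : Nat, winnowStepA hashes (wn : Int) stA ((j : Nat) : Int)
        = (PySem.Set.add stA.1 (wMin hashes wn j), (mn' : Int))
        ∧ j ≤ mn' ∧ mn' < j + wn ∧ hashes.getD mn' 0 = wMin hashes wn j := by
      rcases ihI with ⟨hj0, hm⟩ | ⟨j', mn, hjj, hm, h1, h2, hval⟩
      · have : stA = (stA.1, stA.2) := rfl
        rw [this, hm]
        exact stepA_lt hashes wn j stA.1 (-1) hw hjw (by omega)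
      · have : stA = (stA.1, stA.2) := rfl
        rw [this, hm]
        by_cases hlt : mn < j
        · exact stepA_lt hashes wn j stA.1 (mn : Int) hw hjw (by exact_mod_cast hlt)
        · subst hjj
          exact stepA_ge hashes wn j' mn stA.1 hw (by omega) (by omega) h2 hval
    obtain ⟨mn', heq, hb1, hb2, hb3⟩ := hA
    refine ⟨?_, Or.inr ⟨j, mn', rfl, ?_, hb1, hb2, hb3⟩⟩
    · rw [heq, hBstep, ihS]
    · rw [heq]

-- ===== VERDICT (by name: the statement is the Claim_ definition above) =====
theorem winnow_py_spec : Claim_equal_winnow_py := by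
  intro hashes window_size _ hpre
  unfold Spec_winnow_py winnow_py winnow_py_alt
  by_cases hlen : (hashes.length : Int) < window_size
  · simp [hlen]
  · simp only [if_neg hlen]
    have hw1 : 1 ≤ window_size := hpre
    set wn := window_size.toNat with hwn
    have hweq : window_size = (wn : Int) := by omega
    have hn : wn ≤ hashes.length := by omega
    have hk : (hashes.length : Int) - (wn : Int) + 1 = ((hashes.length - wn + 1 : Nat) : Int) := by
      push_cast; omega
    rw [hweq, hk]
    exact (winnow_loop hashes wn (by omega) hn (hashes.length - wn + 1) (le_refl _)).1
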